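-- pv_equiv track=rewrite | github.com/mehdiskouri/agrisense | app/services/report_service.py | _history_indices
-- ===== SOURCE A (Python) =====
-- def _history_indices(history_length: int, buffer_size: int, history_head: int) -> list[int]:
--     if history_length <= 0 or buffer_size <= 0:
--         return []
--
--     if history_length < buffer_size:
--         return [index for index in range(history_length)]
--
--     # history_head is 1-indexed next-write slot; convert to 0-index oldest slot.
--     start = max(0, history_head - 1)
--     indices: list[int] = []
--     for offset in range(buffer_size):
--         indices.append((start + offset) % buffer_size)
--     return indices
-- ===== SOURCE B (Python) =====
-- def _history_indices(history_length: int, buffer_size: int, history_head: int) -> list[int]: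
--     if history_length <= 0 or buffer_size <= 0:
--         return []
--     if history_length < buffer_size:
--         return list(range(history_length))
--     # Walk BACKWARDS from the slot just before the oldest one, using a
--     # wraparound predecessor instead of per-element modulo, then reverse.
--     cur = max(0, history_head - 1) % buffer_size
--     rev: list[int] = []
--     for _ in range(buffer_size):
--         cur = cur - 1 if cur > 0 else buffer_size - 1
--         rev.append(cur)
--     rev.reverse()
--     return rev
-- ===== Notes on version B (the rewrite author's own statement) =====
-- stated objective: alternative
-- what changed: Instead of computing (start+offset) % buffer_size per element, B walks the buffer backwards from the slot before the oldest one using a wraparound predecessor (cur-1 or buffer_size-1), collects the indices, and reverses the list at the end.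
import Mathlib
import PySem

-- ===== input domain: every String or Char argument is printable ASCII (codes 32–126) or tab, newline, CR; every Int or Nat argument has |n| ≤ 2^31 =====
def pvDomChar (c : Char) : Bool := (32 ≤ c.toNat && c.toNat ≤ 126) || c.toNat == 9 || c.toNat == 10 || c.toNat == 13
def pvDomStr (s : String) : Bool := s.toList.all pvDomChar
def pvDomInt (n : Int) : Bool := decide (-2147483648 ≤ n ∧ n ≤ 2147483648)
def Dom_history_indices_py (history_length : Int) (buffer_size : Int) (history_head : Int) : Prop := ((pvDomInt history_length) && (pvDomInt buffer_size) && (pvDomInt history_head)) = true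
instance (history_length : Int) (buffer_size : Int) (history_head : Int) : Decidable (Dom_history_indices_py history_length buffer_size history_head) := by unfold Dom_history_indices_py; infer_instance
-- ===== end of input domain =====

-- B walks the buffer backwards via a wraparound predecessor and reverses at the end, instead of A's per-element (start+offset) % buffer_size loop (alternative decomposition; return value proved equal everywhere).


-- ===== PORT A =====
def history_indices_py (history_length : Int) (buffer_size : Int) (history_head : Int) : List Int :=
  if history_length ≤ 0 ∨ buffer_size ≤ 0 then []
  else if history_length < buffer_size then
    (PySem.List.pyRange 0 history_length 1).map (fun index => index)
  else
    let start := max 0 (history_head - 1)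
    (PySem.List.pyRange 0 buffer_size 1).foldl
      (fun indices offset => indices ++ [PySem.Int.mod (start + offset) buffer_size]) []

-- ===== PORT B =====
def history_indices_py_alt (history_length : Int) (buffer_size : Int) (history_head : Int) : List Int :=
  if history_length ≤ 0 ∨ buffer_size ≤ 0 then []
  else if history_length < buffer_size then
    PySem.List.pyRange 0 history_length 1
  else
    let cur := PySem.Int.mod (max 0 (history_head - 1)) buffer_size
    let st := (PySem.List.pyRange 0 buffer_size 1).foldl
      (fun (p : List Int × Int) _ =>
        let c := if p.2 > 0 then p.2 - 1 else buffer_size - 1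
        (p.1 ++ [c], c)) ([], cur)
    st.1.reverse

-- ===== PRECONDITION & SPEC =====
def Spec_history_indices_py (history_length : Int) (buffer_size : Int) (history_head : Int) (out : List Int) : Prop := out = history_indices_py_alt history_length buffer_size history_head
instance (history_length : Int) (buffer_size : Int) (history_head : Int) (out : List Int) : Decidable (Spec_history_indices_py history_length buffer_size history_head out) := by unfold Spec_history_indices_py; infer_instance

-- ===== CLAIM (what is proved, stated in full; the proofs are below) =====
def Claim_equal_history_indices_py : Prop := ∀ (history_length : Int) (buffer_size : Int) (history_head : Int), Dom_history_indices_py history_length buffer_size history_head → Spec_history_indices_py history_length buffer_size history_head (history_indices_py history_length buffer_size history_head)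

-- ===== LEMMAS AND PROOFS =====

-- the wraparound predecessor B uses
def pvPred (bs x : Int) : Int := if x > 0 then x - 1 else bs - 1

-- B's fold, which ignores the list elements, is iteration of pvPred collected into a map over range
theorem pvFold_char (bs : Int) (l : List Int) (acc : List Int) (c : Int) :
    l.foldl (fun (p : List Int × Int) _ =>
        let c' := if p.2 > 0 then p.2 - 1 else bs - 1
        (p.1 ++ [c'], c')) (acc, c)
    = (acc ++ (List.range l.length).map (fun i => (pvPred bs)^[i+1] c),
       (pvPred bs)^[l.length] c) := by
  induction l generalizing acc c with
  | nil => simp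
  | cons x t ih =>
    simp only [List.foldl_cons, List.length_cons]
    rw [ih]
    have hpd : (if c > 0 then c - 1 else bs - 1) = pvPred bs c := rfl
    rw [hpd]
    simp only [Prod.mk.injEq]
    constructor
    · rw [List.append_assoc]
      congr 1
      rw [List.range_succ_eq_map, List.map_cons, List.map_map]
      simp [Function.comp_def, Function.iterate_succ_apply]
    · rw [Function.iterate_succ_apply]

-- iterating the predecessor from a reduced start is subtraction mod bs
theorem pvPred_iter (bs s : Int) (hbs : 0 < bs) (h0 : 0 ≤ s) (h1 : s < bs) (k : Nat) :
    (pvPred bs)^[k] s = (s - k) % bs := by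
  induction k with
  | zero => simp [Int.emod_eq_of_lt h0 h1]
  | succ k ih =>
    rw [Function.iterate_succ_apply', ih]
    set t := (s - k) % bs with ht
    have ht0 : 0 ≤ t := Int.emod_nonneg _ (by omega)
    have ht1 : t < bs := Int.emod_lt_of_pos _ hbs
    have key : (s - (k + 1 : Nat)) % bs = (t - 1) % bs := by
      conv_lhs => rw [show (s - (k + 1 : Nat) : Int) = (s - k) - 1 from by push_cast; ring,
        ← Int.mul_ediv_add_emod (s - k) bs, ← ht]
      have : bs * ((s - k) / bs) + t - 1 = (t - 1) + bs * ((s - k) / bs) := by ring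
      rw [this, Int.add_mul_emod_self_left]
    rw [key, pvPred]
    split_ifs with h
    · rw [Int.emod_eq_of_lt (by omega) (by omega)]
    · have ht' : t = 0 := by omega
      rw [ht']
      have : (0 - 1 : Int) = (bs - 1) + bs * (-1) := by ring
      rw [this, Int.add_mul_emod_self_left, Int.emod_eq_of_lt (by omega) (by omega)]

theorem history_indices_py_spec : Claim_equal_history_indices_py := by
  intro hl bs hh _
  unfold Spec_history_indices_py history_indices_py history_indices_py_alt
  split_ifs with h1 h2
  · rfl
  · simp
  · -- full-buffer case
    have hbs : 0 < bs := by omega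
    set st0 := max 0 (hh - 1) with hst0
    have hmodeq : PySem.Int.mod st0 bs = st0 % bs := PySem.Int.mod_eq_emod_of_pos hbs
    set s := st0 % bs with hs
    have hs0 : 0 ≤ s := Int.emod_nonneg _ (by omega)
    have hs1 : s < bs := Int.emod_lt_of_pos _ hbs
    set n := (bs - 0).toNat with hn
    have hnbs : (n : Int) = bs := by omega
    rw [PySem.List.foldl_append_singleton_eq_map, List.nil_append, PySem.List.pyRange_one,
      List.map_map]
    simp only [hmodeq, ← hn]
    rw [pvFold_char bs ((List.range n).map (fun k : Nat => (0 : Int) + k)) [] s,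
      List.nil_append]
    simp only [List.length_map, List.length_range]
    -- now compare the two maps over List.range n elementwise
    apply List.ext_getElem
    · simp
    · intro j hj1 hj2
      simp only [List.length_map, List.length_range] at hj1
      simp only [List.getElem_map, List.getElem_range, List.getElem_reverse,
        List.length_map, List.length_range, Function.comp]
      rw [pvPred_iter bs s hbs hs0 hs1]
      have hcast : ((n - 1 - j + 1 : Nat) : Int) = (n : Int) - j := by omega
      rw [hcast, hnbs]
      rw [PySem.Int.mod_eq_emod_of_pos hbs]
      have hA : (st0 + ((0 : Int) + j)) % bs = (s + j) % bs := by
        conv_lhs => rw [← Int.mul_ediv_add_emod st0 bs, ← hs]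
        have : bs * (st0 / bs) + s + ((0 : Int) + j) = (s + j) + bs * (st0 / bs) := by ring
        rw [this, Int.add_mul_emod_self_left]
      have hB : (s - (bs - (j : Int))) % bs = (s + j) % bs := by
        have : s - (bs - (j : Int)) = (s + j) + bs * (-1) := by ring
        rw [this, Int.add_mul_emod_self_left]
      rw [hA, hB]
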